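-- pv_equiv track=rewrite | github.com/Abhitech-st/First_project | excel_handler.py | convert_formula
-- ===== SOURCE A (Python) =====
-- def convert_formula(named_formula, columns, row_idx):
--     """
--     Convert a column-name formula (e.g. =[Bill Wt (Qtl)] * [Basic Rate as per Bill])
--     into an Excel-style formula with cell references.
--     """
--     if not named_formula:
--         return ""
--
--     # Special case for MRN No.
--     if named_formula.strip().upper() == "=ROW()-1":
--         return "=ROW()-1"
--
--     # Start with the original formula
--     excel_formula = named_formula
--
--     # Replace [Column Name] with Excel cell references
--     for col_name in columns:
--         if f"[{col_name}]" in excel_formula: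
--             col_idx = columns.index(col_name) + 1  # 1-based index
--             excel_col = get_excel_column_name(col_idx)
--             excel_formula = excel_formula.replace(f"[{col_name}]", f"{excel_col}{row_idx}")
--
--     # Ensure it starts with "="
--     if not excel_formula.strip().startswith("="):
--         excel_formula = "=" + excel_formula
--
--     # Replace ROUND function if present
--     if "ROUND(" in excel_formula:
--         excel_formula = excel_formula.replace("ROUND(", "ROUND(")
--
--     return excel_formula
--
-- def get_excel_column_name(n):
--     """
--     Convert a 1-based column index into Excel-style column letters.
--     Example: 1 -> A, 27 -> AA
--     """
--     result = ""
--     while n > 0: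
--         n, remainder = divmod(n - 1, 26)
--         result = chr(65 + remainder) + result
--     return result
-- ===== SOURCE B (Python) =====
-- def _col_letters(n):
--     # 1-based column index -> Excel letters, by recursion (high digits first)
--     if n <= 0:
--         return ""
--     return _col_letters((n - 1) // 26) + chr(65 + (n - 1) % 26)
--
--
-- def convert_formula(named_formula, columns, row_idx):
--     if not named_formula:
--         return ""
--     if named_formula.strip().upper() == "=ROW()-1":
--         return "=ROW()-1"
--     # one pass: cell reference for each column name, first index wins for duplicates
--     ref = {}
--     for i, name in enumerate(columns):
--         if name not in ref:
--             ref[name] = _col_letters(i + 1) + str(row_idx)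
--     formula = named_formula
--     for name in columns:
--         formula = formula.replace("[" + name + "]", ref[name])
--     return formula if formula.strip().startswith("=") else "=" + formula
-- ===== Notes on version B (the rewrite author's own statement) =====
-- stated objective: simpler
-- what changed: B precomputes one first-index dict of cell references (column name -> Excel ref), replacing A's per-column containment guard plus repeated columns.index scan, builds column letters by recursion instead of A's accumulator while-loop, and drops the no-op ROUND( self-replace.
import Mathlib
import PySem

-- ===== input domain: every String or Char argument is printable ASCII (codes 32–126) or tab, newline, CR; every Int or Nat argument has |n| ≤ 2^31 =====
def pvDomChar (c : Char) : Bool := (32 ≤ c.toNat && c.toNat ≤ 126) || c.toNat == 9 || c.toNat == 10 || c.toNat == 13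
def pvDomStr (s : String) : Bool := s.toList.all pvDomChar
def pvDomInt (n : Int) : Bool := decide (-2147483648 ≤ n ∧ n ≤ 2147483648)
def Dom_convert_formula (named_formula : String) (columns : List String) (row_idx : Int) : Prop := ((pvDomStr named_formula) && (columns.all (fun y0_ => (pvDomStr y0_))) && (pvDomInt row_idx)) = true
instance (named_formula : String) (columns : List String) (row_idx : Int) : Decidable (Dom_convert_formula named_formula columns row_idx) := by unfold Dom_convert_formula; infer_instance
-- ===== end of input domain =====

-- B replaces A's per-column `in`-guard + repeated columns.index scan by one prebuilt
-- first-index dict of cell references, a recursive column-letters helper, and drops the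
-- no-op ROUND replace (objective: simpler / idiomatic; no speed claim).

-- ===== PORT A =====
-- get_excel_column_name's while loop: result accumulates by prepending
def pvA_colLoop (n : Int) (result : String) : String :=
  if 0 < n then
    pvA_colLoop (PySem.Int.floordiv (n - 1) 26)
      (String.ofList [Char.ofNat (65 + (PySem.Int.mod (n - 1) 26)).toNat] ++ result)
  else result
termination_by n.toNat
decreasing_by
  have hq : PySem.Int.floordiv (n - 1) 26 = (n - 1) / 26 :=
    PySem.Int.floordiv_eq_ediv_of_pos (by omega)
  have h1 : (n - 1) / 26 ≤ n - 1 := Int.ediv_le_self _ (by omega)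
  have h2 : 0 ≤ (n - 1) / 26 := Int.ediv_nonneg (by omega) (by omega)
  omega

def get_excel_column_name (n : Int) : String := pvA_colLoop n ""

def convert_formula (named_formula : String) (columns : List String) (row_idx : Int) : String :=
  if named_formula = "" then ""
  else if PySem.Str.upper (PySem.Str.strip named_formula) = "=ROW()-1" then "=ROW()-1"
  else
    let excel_formula := columns.foldl (fun ef col_name =>
      if PySem.Str.isIn ("[" ++ col_name ++ "]") ef then
        -- columns.index(col_name): col_name ∈ columns here, so index? is some; getD 0 unreachable
        let col_idx : Int := (((PySem.List.index? columns col_name).getD 0 : Nat) : Int) + 1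
        let excel_col := get_excel_column_name col_idx
        PySem.Str.replace ef ("[" ++ col_name ++ "]") (excel_col ++ PySem.Int.toStr row_idx)
      else ef) named_formula
    let excel_formula :=
      if !(PySem.Str.startswith (PySem.Str.strip excel_formula) "=") then "=" ++ excel_formula
      else excel_formula
    let excel_formula :=
      if PySem.Str.isIn "ROUND(" excel_formula then
        PySem.Str.replace excel_formula "ROUND(" "ROUND("
      else excel_formula
    excel_formula

-- ===== PORT B =====
-- _col_letters: recursion, high letters first
def pvB_colLetters (n : Int) : String :=
  if n ≤ 0 then ""
  else
    pvB_colLetters (PySem.Int.floordiv (n - 1) 26) ++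
      String.ofList [Char.ofNat (65 + (PySem.Int.mod (n - 1) 26)).toNat]
termination_by n.toNat
decreasing_by
  have hq : PySem.Int.floordiv (n - 1) 26 = (n - 1) / 26 :=
    PySem.Int.floordiv_eq_ediv_of_pos (by omega)
  have h1 : (n - 1) / 26 ≤ n - 1 := Int.ediv_le_self _ (by omega)
  have h2 : 0 ≤ (n - 1) / 26 := Int.ediv_nonneg (by omega) (by omega)
  omega

def convert_formula_alt (named_formula : String) (columns : List String) (row_idx : Int) : String :=
  if named_formula = "" then ""
  else if PySem.Str.upper (PySem.Str.strip named_formula) = "=ROW()-1" then "=ROW()-1"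
  else
    let ref : PySem.Dict String String :=
      (PySem.List.enumerate columns).foldl (fun d p =>
        if d.contains p.2 then d
        else d.insert p.2 (pvB_colLetters (p.1 + 1) ++ PySem.Int.toStr row_idx)) PySem.Dict.empty
    let formula := columns.foldl (fun f name =>
      -- ref[name]: name ∈ columns so the key is present; getD "" unreachable
      PySem.Str.replace f ("[" ++ name ++ "]") (ref.getD name "")) named_formula
    if PySem.Str.startswith (PySem.Str.strip formula) "=" then formula else "=" ++ formula

-- ===== PRECONDITION & SPEC =====
def Spec_convert_formula (named_formula : String) (columns : List String) (row_idx : Int) (out : String) : Prop := out = convert_formula_alt named_formula columns row_idx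
instance (named_formula : String) (columns : List String) (row_idx : Int) (out : String) : Decidable (Spec_convert_formula named_formula columns row_idx out) := by unfold Spec_convert_formula; infer_instance

-- ===== CLAIM (what is proved, stated in full; the proofs are below) =====
def Claim_equal_convert_formula : Prop := ∀ (named_formula : String) (columns : List String) (row_idx : Int), Dom_convert_formula named_formula columns row_idx → Spec_convert_formula named_formula columns row_idx (convert_formula named_formula columns row_idx)

-- ===== LEMMAS AND PROOFS =====

-- replace.go on text that nowhere has `old` as a prefix of a suffix copies the text
theorem pvReplaceGo_id (old new : List Char) :
    ∀ (fuel : Nat) (l acc : List Char), (∀ j, ¬ old <+: l.drop j) →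
      PySem.Chars.replace.go old new fuel l acc = acc.reverse ++ l := by
  intro fuel
  induction fuel with
  | zero => intro l acc _; simp [PySem.Chars.replace.go]
  | succ fuel ih =>
    intro l acc h
    cases l with
    | nil => simp [PySem.Chars.replace.go]
    | cons c t =>
      have hpre : ¬ old.isPrefixOf (c :: t) = true := by
        rw [List.isPrefixOf_iff_prefix]
        exact h 0
      rw [PySem.Chars.replace.go, if_neg hpre]
      rw [ih t (c :: acc) (fun j => by simpa using h (j + 1))]
      simp

-- replacing a pattern by itself is the identity
theorem pvReplaceGo_self (old : List Char) :
    ∀ (fuel : Nat) (l acc : List Char),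
      PySem.Chars.replace.go old old fuel l acc = acc.reverse ++ l := by
  intro fuel
  induction fuel with
  | zero => intro l acc; simp [PySem.Chars.replace.go]
  | succ fuel ih =>
    intro l acc
    cases l with
    | nil => simp [PySem.Chars.replace.go]
    | cons c t =>
      rw [PySem.Chars.replace.go]
      by_cases hpre : old.isPrefixOf (c :: t) = true
      · simp only [hpre, if_true]
        rw [ih]
        have hp : old <+: (c :: t) := List.isPrefixOf_iff_prefix.mp hpre
        have hdrop : old ++ List.drop old.length (c :: t) = c :: t := by
          obtain ⟨r, hr⟩ := hp
          have h2 : List.drop old.length (c :: t) = r := by rw [← hr]; simp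
          rw [h2]; exact hr
        simp only [List.reverse_append, List.reverse_reverse, List.append_assoc]
        rw [hdrop]
      · simp only [hpre]
        rw [if_neg (by simp), ih]
        simp

theorem pvStrReplace_not_in (s old new : String) (h : PySem.Str.isIn old s = false) :
    PySem.Str.replace s old new = s := by
  apply String.toList_inj.mp
  rw [PySem.Str.toList_replace]
  rw [PySem.Str.isIn_eq] at h
  have hne : old.toList.isEmpty = false := by
    cases he : old.toList.isEmpty
    · rfl
    · exfalso
      have h0 : old.toList = [] := List.isEmpty_iff.mp he
      rw [h0, PySem.Chars.isIn_nil] at h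
      exact absurd h (by simp)
  unfold PySem.Chars.replace
  rw [hne]
  simp only [Bool.false_eq_true, if_false]
  rw [pvReplaceGo_id]
  · simp
  · intro j hj
    have : PySem.Chars.isIn old.toList s.toList = true :=
      (PySem.Chars.exists_prefix_drop_iff_isIn _ _).mp ⟨j, hj⟩
    rw [h] at this
    exact Bool.false_ne_true this

theorem pvStrReplace_self (s old : String) : PySem.Str.replace s old old = s := by
  apply String.toList_inj.mp
  rw [PySem.Str.toList_replace]
  unfold PySem.Chars.replace
  by_cases he : old.toList.isEmpty = true
  · have h0 : old.toList = [] := List.isEmpty_iff.mp he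
    rw [h0]
    simp [List.flatMap_singleton']
  · rw [eq_false_of_ne_true he]
    simp only [Bool.false_eq_true, if_false]
    rw [pvReplaceGo_self]
    simp

-- A's accumulator loop computes B's recursion followed by the accumulator
theorem pvColLoop_eq (n : Int) (acc : String) :
    pvA_colLoop n acc = pvB_colLetters n ++ acc := by
  induction n, acc using pvA_colLoop.induct with
  | case1 n acc h ih =>
    rw [pvA_colLoop, pvB_colLetters]
    simp only [h, if_true, if_neg (by omega : ¬ n ≤ 0)]
    rw [ih, String.append_assoc]
  | case2 n acc h =>
    rw [pvA_colLoop, pvB_colLetters]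
    simp only [h, if_false, if_pos (by omega : n ≤ 0)]
    simp

theorem pvColName_eq (n : Int) : get_excel_column_name n = pvB_colLetters n := by
  unfold get_excel_column_name
  rw [pvColLoop_eq]
  simp

-- what B's first-index dict holds for each key
theorem pvRef_getD (row_idx : Int) :
    ∀ (cols : List String) (s : Int) (d : PySem.Dict String String) (name : String),
      ((PySem.List.enumerate cols s).foldl (fun d p =>
          if d.contains p.2 then d
          else d.insert p.2 (pvB_colLetters (p.1 + 1) ++ PySem.Int.toStr row_idx)) d).getD name ""
        = if d.contains name then d.getD name ""
          else match PySem.List.index? cols name with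
               | some k => pvB_colLetters (s + (k : Int) + 1) ++ PySem.Int.toStr row_idx
               | none => "" := by
  intro cols
  induction cols with
  | nil =>
    intro s d name
    simp only [PySem.List.enumerate_nil, List.foldl_nil]
    by_cases h : d.contains name = true
    · simp [h]
    · rw [eq_false_of_ne_true h]
      simp only [Bool.false_eq_true, if_false]
      rw [PySem.Dict.getD_of_not_contains _ _ (eq_false_of_ne_true h)]
      simp [PySem.List.index?]
  | cons x xs ih =>
    intro s d name
    rw [PySem.List.enumerate_cons, List.foldl_cons]
    by_cases hd : d.contains x = true
    · have hstep : (if d.contains x then d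
          else d.insert x (pvB_colLetters (s + 1) ++ PySem.Int.toStr row_idx)) = d := by
        rw [if_pos hd]
      simp only [hstep]
      rw [ih]
      by_cases hdn : d.contains name = true
      · simp [hdn]
      · have hx : x ≠ name := fun h => hdn (h ▸ hd)
        rw [eq_false_of_ne_true hdn]
        simp only [Bool.false_eq_true, if_false]
        rw [PySem.List.index?_cons_of_ne _ hx]
        cases hk : PySem.List.index? xs name with
        | none => simp
        | some k =>
          simp only [Option.map_some]
          have harith : s + 1 + (k : Int) + 1 = s + ((k + 1 : Nat) : Int) + 1 := by
            push_cast; ring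
          simp [harith]
    · have hstep : (if d.contains x then d
          else d.insert x (pvB_colLetters (s + 1) ++ PySem.Int.toStr row_idx))
          = d.insert x (pvB_colLetters (s + 1) ++ PySem.Int.toStr row_idx) := by
        rw [if_neg (by simp [hd])]
      simp only [hstep]
      rw [ih]
      by_cases hx : name = x
      · subst hx
        have hc : (d.insert name (pvB_colLetters (s + 1) ++ PySem.Int.toStr row_idx)).contains name = true := by
          rw [PySem.Dict.contains_insert]; simp
        rw [if_pos hc, eq_false_of_ne_true hd]
        simp only [Bool.false_eq_true, if_false]
        rw [PySem.Dict.getD_insert, if_pos rfl, PySem.List.index?_cons_self]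
        norm_num
      · have hc : (d.insert x (pvB_colLetters (s + 1) ++ PySem.Int.toStr row_idx)).contains name
            = d.contains name := by
          rw [PySem.Dict.contains_insert]
          simp [hx]
        rw [hc, PySem.Dict.getD_insert, if_neg hx,
          PySem.List.index?_cons_of_ne _ (fun h => hx h.symm)]
        by_cases hdn : d.contains name = true
        · simp [hdn]
        · rw [eq_false_of_ne_true hdn]
          simp only [Bool.false_eq_true, if_false]
          cases hk : PySem.List.index? xs name with
          | none => simp
          | some k =>
            simp only [Option.map_some]
            have harith : s + 1 + (k : Int) + 1 = s + ((k + 1 : Nat) : Int) + 1 := by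
              push_cast; ring
            simp [harith]

-- ===== VERDICT (by name: the statement is the Claim_ definition above) =====
theorem convert_formula_spec : Claim_equal_convert_formula := by
  intro named_formula columns row_idx _
  unfold Spec_convert_formula convert_formula convert_formula_alt
  by_cases h0 : named_formula = ""
  · simp [h0]
  · rw [if_neg h0, if_neg h0]
    by_cases h1 : PySem.Str.upper (PySem.Str.strip named_formula) = "=ROW()-1"
    · rw [if_pos h1, if_pos h1]
    · rw [if_neg h1, if_neg h1]
      simp only []
      have hfold :
          columns.foldl (fun ef col_name =>
            if PySem.Str.isIn ("[" ++ col_name ++ "]") ef then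
              PySem.Str.replace ef ("[" ++ col_name ++ "]")
                (get_excel_column_name ((((PySem.List.index? columns col_name).getD 0 : Nat) : Int) + 1)
                  ++ PySem.Int.toStr row_idx)
            else ef) named_formula
          = columns.foldl (fun f name =>
              PySem.Str.replace f ("[" ++ name ++ "]")
                (((PySem.List.enumerate columns).foldl (fun d p =>
                    if d.contains p.2 then d
                    else d.insert p.2 (pvB_colLetters (p.1 + 1) ++ PySem.Int.toStr row_idx))
                  PySem.Dict.empty).getD name "")) named_formula := by
        apply PySem.List.foldl_congr_mem
        intro acc name hmem
        have hsome : ∃ k, PySem.List.index? columns name = some k := by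
          have := (PySem.List.index?_isSome_iff (xs := columns) (v := name)).mpr hmem
          exact Option.isSome_iff_exists.mp this
        obtain ⟨k, hk⟩ := hsome
        have href : ((PySem.List.enumerate columns).foldl (fun d p =>
              if d.contains p.2 then d
              else d.insert p.2 (pvB_colLetters (p.1 + 1) ++ PySem.Int.toStr row_idx))
            PySem.Dict.empty).getD name ""
            = pvB_colLetters ((k : Int) + 1) ++ PySem.Int.toStr row_idx := by
          rw [pvRef_getD]
          rw [PySem.Dict.contains_empty]
          simp only [Bool.false_eq_true, if_false, hk]
          norm_num
        rw [href, hk]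
        simp only [Option.getD_some]
        by_cases hin : PySem.Str.isIn ("[" ++ name ++ "]") acc = true
        · rw [if_pos hin, pvColName_eq]
        · rw [if_neg hin]
          rw [pvStrReplace_not_in _ _ _ (eq_false_of_ne_true hin)]
      rw [hfold]
      set F := columns.foldl (fun f name =>
              PySem.Str.replace f ("[" ++ name ++ "]")
                (((PySem.List.enumerate columns).foldl (fun d p =>
                    if d.contains p.2 then d
                    else d.insert p.2 (pvB_colLetters (p.1 + 1) ++ PySem.Int.toStr row_idx))
                  PySem.Dict.empty).getD name "")) named_formula with hF
      by_cases hs : PySem.Str.startswith (PySem.Str.strip F) "=" = true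
      · simp only [hs, Bool.not_true, Bool.false_eq_true, if_false, if_true]
        by_cases hr : PySem.Str.isIn "ROUND(" F = true
        · rw [if_pos hr, pvStrReplace_self]
        · rw [if_neg hr]
      · rw [eq_false_of_ne_true hs]
        simp only [Bool.not_false, if_true, Bool.false_eq_true, if_false]
        by_cases hr : PySem.Str.isIn "ROUND(" ("=" ++ F) = true
        · rw [if_pos hr, pvStrReplace_self]
        · rw [if_neg hr]
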